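-- pv_equiv track=rewrite | github.com/hhank/lettuce | lettuce/strings.py | parse_multiline
-- ===== SOURCE A (Python) =====
-- def parse_multiline(lines):
--     multilines = []
--     in_multiline = False
--     for line in lines:
--         if line == '"""':
--             in_multiline = not in_multiline
--         elif in_multiline:
--             if line.startswith('"'):
--                 line = line[1:]
--             if line.endswith('"'):
--                 line = line[:-1]
--             multilines.append(line)
--     return '\n'.join(multilines)
-- ===== SOURCE B (Python) =====
-- def parse_multiline(lines):
--     # Split the input on marker lines into segments, then keep the
--     # odd-indexed segments (the ones between an opening and a closing
--     # marker, plus a trailing dangling-open segment), strip one leading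
--     # and one trailing '"' from each kept line, and join.
--     segments = []
--     current = []
--     for line in lines:
--         if line == '"""':
--             segments.append(current)
--             current = []
--         else:
--             current.append(line)
--     segments.append(current)
--     pieces = []
--     for i, segment in enumerate(segments):
--         if i % 2 == 1:
--             for line in segment:
--                 if line.startswith('"'):
--                     line = line[1:]
--                 if line.endswith('"'):
--                     line = line[:-1]
--                 pieces.append(line)
--     return '\n'.join(pieces)
-- ===== Notes on version B (the rewrite author's own statement) =====
-- stated objective: alternative
-- what changed: Replaces the toggle-flag single pass with a split-into-segments-on-marker pass followed by selecting the odd-indexed segments (which automatically covers a dangling open marker) and stripping/joining their lines.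
import Mathlib
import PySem

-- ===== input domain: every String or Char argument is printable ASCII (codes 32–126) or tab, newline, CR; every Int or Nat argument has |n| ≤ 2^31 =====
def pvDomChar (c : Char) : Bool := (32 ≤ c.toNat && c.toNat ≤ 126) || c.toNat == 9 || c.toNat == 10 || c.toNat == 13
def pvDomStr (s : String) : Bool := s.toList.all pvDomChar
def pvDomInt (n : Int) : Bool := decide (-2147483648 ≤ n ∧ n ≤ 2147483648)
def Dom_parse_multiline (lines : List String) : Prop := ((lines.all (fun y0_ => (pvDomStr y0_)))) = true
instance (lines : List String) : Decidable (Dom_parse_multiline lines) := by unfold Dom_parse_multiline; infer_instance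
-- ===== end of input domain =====

-- B replaces A's toggle-flag pass by split-on-marker segments + odd-indexed selection (alternative decomposition, same cost).

-- ===== PORT A =====
def parse_multiline (lines : List String) : String :=
  let st := lines.foldl (fun (st : List String × Bool) line =>
    let (multilines, in_multiline) := st
    if line = "\"\"\"" then (multilines, !in_multiline)
    else if in_multiline then
      let line := if PySem.Str.startswith line "\"" then PySem.Str.slice line (some 1) none else line
      let line := if PySem.Str.endswith line "\"" then PySem.Str.slice line none (some (-1)) else line
      (multilines ++ [line], in_multiline)
    else (multilines, in_multiline)) ([], false)
  PySem.Str.join "\n" st.1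

-- ===== PORT B =====
def parse_multiline_alt (lines : List String) : String :=
  let st := lines.foldl (fun (st : List (List String) × List String) line =>
    let (segments, current) := st
    if line = "\"\"\"" then (segments ++ [current], [])
    else (segments, current ++ [line])) ([], [])
  let segments := st.1 ++ [st.2]
  let pieces := (PySem.List.enumerate segments).foldl (fun pieces p =>
    if PySem.Int.mod p.1 2 = 1 then
      p.2.foldl (fun pieces line =>
        let line := if PySem.Str.startswith line "\"" then PySem.Str.slice line (some 1) none else line
        let line := if PySem.Str.endswith line "\"" then PySem.Str.slice line none (some (-1)) else line
        pieces ++ [line]) pieces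
    else pieces) []
  PySem.Str.join "\n" pieces

-- ===== PRECONDITION & SPEC =====
def Spec_parse_multiline (lines : List String) (out : String) : Prop := out = parse_multiline_alt lines
instance (lines : List String) (out : String) : Decidable (Spec_parse_multiline lines out) := by unfold Spec_parse_multiline; infer_instance

-- ===== CLAIM (what is proved, stated in full; the proofs are below) =====
def Claim_equal_parse_multiline : Prop := ∀ (lines : List String), Dom_parse_multiline lines → Spec_parse_multiline lines (parse_multiline lines)

-- ===== LEMMAS AND PROOFS =====

/-- the single-line strip both programs apply to a collected line -/
def pvStrip (line : String) : String :=
  let line := if PySem.Str.startswith line "\"" then PySem.Str.slice line (some 1) none else line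
  if PySem.Str.endswith line "\"" then PySem.Str.slice line none (some (-1)) else line

/-- A's loop as structural recursion. -/
def aRec (b : Bool) : List String → List String
  | [] => []
  | l :: ls =>
    if l = "\"\"\"" then aRec (!b) ls
    else if b then pvStrip l :: aRec b ls
    else aRec b ls

/-- (head, tail) of the segment decomposition of lines on the marker. -/
def splitRec : List String → List String × List (List String)
  | [] => ([], [])
  | l :: ls =>
    let (h, t) := splitRec ls
    if l = "\"\"\"" then ([], h :: t) else (l :: h, t)

/-- select segments at odd absolute index i, stripping their lines. -/
def selI (i : Int) : List (List String) → List String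
  | [] => []
  | s :: t => if PySem.Int.mod i 2 = 1 then s.map pvStrip ++ selI (i + 1) t else selI (i + 1) t

/-- select segments by a parity flag (true = take head), stripping. -/
def selRec (b : Bool) : List (List String) → List String
  | [] => []
  | s :: t => if b then s.map pvStrip ++ selRec (!b) t else selRec (!b) t

theorem aFold_eq (lines : List String) (acc : List String) (b : Bool) :
    (lines.foldl (fun (st : List String × Bool) line =>
      let (multilines, in_multiline) := st
      if line = "\"\"\"" then (multilines, !in_multiline)
      else if in_multiline then
        let line := if PySem.Str.startswith line "\"" then PySem.Str.slice line (some 1) none else line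
        let line := if PySem.Str.endswith line "\"" then PySem.Str.slice line none (some (-1)) else line
        (multilines ++ [line], in_multiline)
      else (multilines, in_multiline)) (acc, b)).1 = acc ++ aRec b lines := by
  induction lines generalizing acc b with
  | nil => simp [aRec]
  | cons l ls ih =>
    by_cases hq : l = "\"\"\"" <;> by_cases hb : b = true <;>
      simp [List.foldl_cons, hq, hb, aRec, pvStrip] at * <;>
      simp [ih]

theorem segFold_eq (lines : List String) (segs : List (List String)) (cur : List String) :
    (lines.foldl (fun (st : List (List String) × List String) line =>
      let (segments, current) := st
      if line = "\"\"\"" then (segments ++ [current], [])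
      else (segments, current ++ [line])) (segs, cur)).1 ++
    [(lines.foldl (fun (st : List (List String) × List String) line =>
      let (segments, current) := st
      if line = "\"\"\"" then (segments ++ [current], [])
      else (segments, current ++ [line])) (segs, cur)).2]
    = segs ++ (cur ++ (splitRec lines).1) :: (splitRec lines).2 := by
  induction lines generalizing segs cur with
  | nil => simp [splitRec]
  | cons l ls ih =>
    by_cases hq : l = "\"\"\"" <;> simp [List.foldl_cons, hq, splitRec, ih]

theorem innerFold_eq (s : List String) (pieces : List String) :
    s.foldl (fun pieces line =>
      let line := if PySem.Str.startswith line "\"" then PySem.Str.slice line (some 1) none else line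
      let line := if PySem.Str.endswith line "\"" then PySem.Str.slice line none (some (-1)) else line
      pieces ++ [line]) pieces = pieces ++ s.map pvStrip := by
  induction s generalizing pieces with
  | nil => simp
  | cons l ls ih =>
    rw [List.foldl_cons, ih]
    show (pieces ++ [pvStrip l]) ++ List.map pvStrip ls = pieces ++ List.map pvStrip (l :: ls)
    simp

theorem pieceFold_eq (segs : List (List String)) (i : Int) (pieces : List String) :
    ((PySem.List.enumerate segs i).foldl (fun pieces (p : Int × List String) =>
      if PySem.Int.mod p.1 2 = 1 then
        p.2.foldl (fun pieces line =>
          let line := if PySem.Str.startswith line "\"" then PySem.Str.slice line (some 1) none else line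
          let line := if PySem.Str.endswith line "\"" then PySem.Str.slice line none (some (-1)) else line
          pieces ++ [line]) pieces
      else pieces) pieces) = pieces ++ selI i segs := by
  induction segs generalizing i pieces with
  | nil => simp [PySem.List.enumerate_nil, selI]
  | cons s t ih =>
    rw [PySem.List.enumerate_cons, List.foldl_cons, ih]
    by_cases h : PySem.Int.mod i 2 = 1 <;>
      simp only [selI, h, if_true, if_false, innerFold_eq] <;>
      simp [List.append_assoc]

theorem modFlipB (i : Int) :
    decide (PySem.Int.mod (i + 1) 2 = 1) = !decide (PySem.Int.mod i 2 = 1) := by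
  rw [PySem.Int.mod_eq_emod_of_pos (by omega), PySem.Int.mod_eq_emod_of_pos (by omega)]
  by_cases h : i % 2 = 1 <;> simp [h] <;> omega


theorem selI_eq_selRec (segs : List (List String)) (i : Int) :
    selI i segs = selRec (decide (PySem.Int.mod i 2 = 1)) segs := by
  induction segs generalizing i with
  | nil => simp [selI, selRec]
  | cons s t ih =>
    simp only [selI, selRec, ih, modFlipB i]
    by_cases h : PySem.Int.mod i 2 = 1 <;> simp [h]

theorem aRec_eq_selRec (lines : List String) (b : Bool) :
    aRec b lines = selRec b ((splitRec lines).1 :: (splitRec lines).2) := by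
  induction lines generalizing b with
  | nil => cases b <;> simp [aRec, splitRec, selRec]
  | cons l ls ih =>
    by_cases hq : l = "\"\"\"" <;> cases b <;> simp [aRec, splitRec, hq, selRec, ih]

-- ===== VERDICT (by name: the statement is the Claim_ definition above) =====
theorem parse_multiline_spec : Claim_equal_parse_multiline := by
  intro lines _
  show parse_multiline lines = parse_multiline_alt lines
  simp only [parse_multiline, parse_multiline_alt]
  rw [aFold_eq lines [] false, segFold_eq lines [] [], pieceFold_eq, selI_eq_selRec,
    aRec_eq_selRec]
  norm_num [PySem.Int.mod_eq_emod_of_pos]
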